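-- pv_equiv track=rewrite | github.com/KirylDorakh/Practica_python_OOP | Tasks/3.py | replace_duplicates
-- ===== SOURCE A (Python) =====
-- import string
--
-- alph = list(string.ascii_lowercase)
--
-- def replace_duplicates(s):
--     counter1 = 1
--     while counter1:
--         counter1 = 0
--         result = ''
--         d1 = {}
--         for i in range(len(s)):
--             d1[s[i]] = s.count(s[i])
--         for key, value in d1.items():
--             if value == 1:
--                 result += key
--             else:
--                 counter1 = value
--                 while value > 0:
--                     if value // 2:
--                         value -= 2
--                         if key != 'z':
--                             result += alph[alph.index(key) + 1]
--                         else: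
--                             result += alph[0]
--                     else:
--                         value -= 1
--                         result += key
--         s = result
--
--     return s
-- ===== SOURCE B (Python) =====
-- def replace_duplicates(s):
--     # Work on an ordered count map instead of rebuilding strings: each pass folds
--     # every pair of a letter into one next-letter ('z' wraps to 'a') directly on
--     # the counts, keeping first-appearance order; the string is only built once
--     # at the end, when every count is 1.
--     d = {}
--     for ch in s:
--         d[ch] = d.get(ch, 0) + 1
--     while any(v != 1 for v in d.values()):
--         nd = {}
--         for ch, v in d.items():
--             if v == 1:
--                 nd[ch] = nd.get(ch, 0) + 1
--             else:
--                 q, r = divmod(v, 2)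
--                 nxt = 'a' if ch == 'z' else chr(ord(ch) + 1)
--                 nd[nxt] = nd.get(nxt, 0) + q
--                 if r:
--                     nd[ch] = nd.get(ch, 0) + r
--         d = nd
--     return ''.join(d.keys())
-- ===== Notes on version B (the rewrite author's own statement) =====
-- stated objective: faster
-- what changed: B never builds the intermediate strings at all: it converts s once into an insertion-ordered count map and runs the whole fixed-point iteration on that map (folding each pair of a letter into the next letter arithmetically), joining the keys into a string only once at the end, whereas A re-counts and re-concatenates a full string every pass.
import Mathlib
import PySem

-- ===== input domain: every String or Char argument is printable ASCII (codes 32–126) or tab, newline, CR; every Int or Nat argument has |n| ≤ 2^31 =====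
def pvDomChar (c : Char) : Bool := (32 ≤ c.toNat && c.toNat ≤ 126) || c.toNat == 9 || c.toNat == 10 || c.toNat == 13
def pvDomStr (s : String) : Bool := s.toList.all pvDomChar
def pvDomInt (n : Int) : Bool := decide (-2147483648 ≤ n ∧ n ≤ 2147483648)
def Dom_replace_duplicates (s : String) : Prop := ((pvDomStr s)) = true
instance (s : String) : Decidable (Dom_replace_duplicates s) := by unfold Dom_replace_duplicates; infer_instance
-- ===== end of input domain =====

-- B never rebuilds the intermediate strings: it simulates every pass directly on an ordered
-- count map (first-appearance order) and materializes the string once at the end (faster per pass).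

-- ===== PORT A =====
-- alph = list(string.ascii_lowercase)
def alphA : List Char :=
  ['a','b','c','d','e','f','g','h','i','j','k','l','m','n','o','p','q','r','s','t','u','v','w','x','y','z']

-- `alph[alph.index(key) + 1]` / `alph[0]`; the `getD`/`none` defaults stand for Python's
-- ValueError (key not in alph) and IndexError — both unreachable on inputs satisfying Pre_.
def nextA (key : Char) : Char :=
  if key ≠ 'z' then
    match PySem.List.index? alphA key with
    | some i => (PySem.List.pyGet? alphA ((i : Int) + 1)).getD 'a'
    | none   => 'a'
  else (PySem.List.pyGet? alphA 0).getD 'a'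

-- the inner `while value > 0` loop, accumulating `result`
def innerA (key : Char) (value : Int) (result : List Char) : List Char :=
  if 0 < value then
    if PySem.Int.floordiv value 2 ≠ 0 then innerA key (value - 2) (result ++ [nextA key])
    else innerA key (value - 1) (result ++ [key])
  else result
termination_by value.toNat
decreasing_by
  · have h2 : PySem.Int.floordiv value 2 = value / 2 := PySem.Int.floordiv_eq_ediv_of_pos (by omega)
    rename_i hfd; rw [h2] at hfd; omega
  · omega

-- d1[s[i]] = s.count(s[i]) for i in range(len(s))  (s[i] ranges over the chars of s)
def dictA (l : List Char) : PySem.Dict Char Int :=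
  l.foldl (fun d c => d.insert c ((PySem.Chars.count l [c] : Int))) PySem.Dict.empty

-- one body of the outer while loop: returns (result, counter1)
def stepA (l : List Char) : List Char × Int :=
  (dictA l).items.foldl
    (fun acc kv =>
      if kv.2 == 1 then (acc.1 ++ [kv.1], acc.2)
      else (innerA kv.1 kv.2 acc.1, kv.2))
    ([], 0)

-- the outer `while counter1:` loop, ported with fuel |s|+1 (each changing iteration strictly
-- shrinks the string, so this fuel is never exhausted on the tested domain)
def loopA : Nat → List Char → List Char
  | 0, l => l
  | n + 1, l =>
    let r := stepA l
    if r.2 ≠ 0 then loopA n r.1 else r.1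

def replace_duplicates (s : String) : String :=
  String.mk (loopA (s.toList.length + 1) s.toList)

-- ===== PORT B =====
-- nxt = 'a' if ch == 'z' else chr(ord(ch) + 1)
def nextB (ch : Char) : Char := if ch = 'z' then 'a' else Char.ofNat (ch.toNat + 1)

-- d[ch] = d.get(ch, 0) + 1 for ch in s
def countB (l : List Char) : PySem.Dict Char Int :=
  l.foldl (fun d c => d.insert c (d.getD c 0 + 1)) PySem.Dict.empty

-- the body of `for ch, v in d.items():` building nd (q = v // 2, r = v % 2, n = nxt inlined)
def stepBf1 (nd : PySem.Dict Char Int) (kv : Char × Int) : PySem.Dict Char Int :=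
  nd.insert (nextB kv.1) (nd.getD (nextB kv.1) 0 + PySem.Int.floordiv kv.2 2)

def stepBf (nd : PySem.Dict Char Int) (kv : Char × Int) : PySem.Dict Char Int :=
  if kv.2 == 1 then nd.insert kv.1 (nd.getD kv.1 0 + 1)
  else if PySem.Int.mod kv.2 2 ≠ 0 then
    (stepBf1 nd kv).insert kv.1 ((stepBf1 nd kv).getD kv.1 0 + PySem.Int.mod kv.2 2)
  else stepBf1 nd kv

-- one body of the `while` loop: nd = {}; for ch, v in d.items(): …; d = nd
def stepB (d : PySem.Dict Char Int) : PySem.Dict Char Int :=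
  d.items.foldl stepBf PySem.Dict.empty

-- not any(v != 1 for v in d.values())
def allOneB (d : PySem.Dict Char Int) : Bool := d.values.all (· == 1)

-- `while any(v != 1 …): d = step(d)`, same fuel as port A
def loopB : Nat → PySem.Dict Char Int → PySem.Dict Char Int
  | 0, d => d
  | n + 1, d => if allOneB d then d else loopB n (stepB d)

-- ''.join(d.keys())
def replace_duplicates_alt (s : String) : String :=
  String.mk ((loopB (s.toList.length + 1) (countB s.toList)).keys)

-- ===== PRECONDITION & SPEC =====
def lowLetters : List Char :=
  ['a','b','c','d','e','f','g','h','i','j','k','l','m','n','o','p','q','r','s','t','u','v','w','x','y','z']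

-- Pre_ excludes exactly the inputs on which A raises ValueError: strings in which some character
-- that is not a lowercase ASCII letter occurs more than once (A then calls alph.index on it).
def Pre_replace_duplicates (s : String) : Prop :=
  (s.toList.all (fun c => lowLetters.contains c || s.toList.count c ≤ 1)) = true

instance (s : String) : Decidable (Pre_replace_duplicates s) := by
  unfold Pre_replace_duplicates; infer_instance

def pvWitness_replace_duplicates : String := "hello !"

def Spec_replace_duplicates (s : String) (out : String) : Prop := out = replace_duplicates_alt s
instance (s : String) (out : String) : Decidable (Spec_replace_duplicates s out) := by
  unfold Spec_replace_duplicates; infer_instance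

-- ===== CLAIM (what is proved, stated in full; the proofs are below) =====
def Claim_equal_replace_duplicates : Prop :=
  ∀ (s : String), Dom_replace_duplicates s → Pre_replace_duplicates s →
    Spec_replace_duplicates s (replace_duplicates s)

-- ===== LEMMAS AND PROOFS =====

-- str.count with a single-character needle is List.count
theorem pvGo_singleton (c : Char) : ∀ (t : List Char) (fuel acc : Nat), t.length ≤ fuel →
    PySem.Chars.count.go [c] fuel t acc = acc + t.count c := by
  intro t
  induction t with
  | nil => intro fuel acc h; cases fuel <;> simp [PySem.Chars.count.go]
  | cons h t ih =>
    intro fuel acc hle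
    cases fuel with
    | zero => simp at hle
    | succ n =>
      simp only [PySem.Chars.count.go, List.isPrefixOf, List.length_singleton, List.drop_one,
        List.tail_cons]
      by_cases hc : c = h
      · subst hc
        simp [ih _ _ (by simpa using hle)]
        omega
      · have hb : (c == h) = false := by simpa using hc
        simp only [hb, Bool.false_and]
        simp [ih _ _ (by simpa using hle), List.count_cons]
        intro h'; exact absurd h'.symm hc

theorem pvCount_singleton (l : List Char) (c : Char) :
    PySem.Chars.count l [c] = l.count c := by
  simp [PySem.Chars.count]
  rw [pvGo_singleton c l l.length 0 le_rfl]
  omega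

theorem pvNextA_eq_nextB : ∀ k ∈ lowLetters, nextA k = nextB k := by
  have h : lowLetters.all (fun k => nextA k == nextB k) = true := by decide
  intro k hk
  simpa using List.all_eq_true.mp h k hk

theorem pvNextB_mem : ∀ k ∈ lowLetters, nextB k ∈ lowLetters := by
  have h : lowLetters.all (fun k => lowLetters.contains (nextB k)) = true := by decide
  intro k hk
  simpa using List.all_eq_true.mp h k hk

-- what one (key, value) item contributes to A's per-pass result string
def chunkB (ch : Char) (v : Int) : List Char :=
  List.replicate (PySem.Int.floordiv v 2).toNat (nextB ch) ++
    List.replicate (PySem.Int.mod v 2).toNat ch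

def chunkIf (kv : Char × Int) : List Char :=
  if kv.2 = 1 then [kv.1] else chunkB kv.1 kv.2

-- the property each (key, value) item of the per-iteration dict has on an invariant-respecting string
def ItemOK (kv : Char × Int) : Prop := 1 ≤ kv.2 ∧ (kv.2 ≠ 1 → kv.1 ∈ lowLetters)

-- invariant carried across outer iterations (= Pre_, stated for all characters)
def InvL (l : List Char) : Prop := ∀ c, c ∉ lowLetters → l.count c ≤ 1

-- the items of A's per-pass dict, in first-appearance order
def itemsOf (l : List Char) : List (Char × Int) :=
  (PySem.Set.ofList l).map (fun k => (k, (l.count k : Int)))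

theorem pvInnerA_aux (key : Char) : ∀ (n : Nat) (v : Int), v.toNat ≤ n → 0 ≤ v →
    ∀ (res : List Char),
    innerA key v res =
      res ++ (List.replicate (PySem.Int.floordiv v 2).toNat (nextA key) ++
        List.replicate (PySem.Int.mod v 2).toNat key) := by
  intro n
  induction n with
  | zero =>
    intro v hn h0 res
    have hv : v = 0 := by omega
    subst hv
    rw [innerA]
    have z1 : PySem.Int.floordiv 0 2 = 0 := by decide
    have z2 : PySem.Int.mod 0 2 = 0 := by decide
    rw [z1, z2]
    simp
  | succ n ih =>
    intro v hn h0 res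
    rw [innerA]
    by_cases hpos : 0 < v
    · have hfd : PySem.Int.floordiv v 2 = v / 2 := PySem.Int.floordiv_eq_ediv_of_pos (by omega)
      have hmd : PySem.Int.mod v 2 = v % 2 := PySem.Int.mod_eq_emod_of_pos (by omega)
      rw [if_pos hpos]
      by_cases h2 : 2 ≤ v
      · rw [if_pos (by rw [hfd]; omega)]
        rw [ih (v - 2) (by omega) (by omega)]
        have hfd2 : PySem.Int.floordiv (v - 2) 2 = (v - 2) / 2 :=
          PySem.Int.floordiv_eq_ediv_of_pos (by omega)
        have hmd2 : PySem.Int.mod (v - 2) 2 = (v - 2) % 2 :=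
          PySem.Int.mod_eq_emod_of_pos (by omega)
        rw [hfd, hmd, hfd2, hmd2]
        have e1 : (v / 2).toNat = ((v - 2) / 2).toNat + 1 := by omega
        have e2 : ((v - 2) % 2).toNat = (v % 2).toNat := by omega
        rw [e1, e2, List.replicate_succ]
        simp
      · have hv1 : v = 1 := by omega
        subst hv1
        rw [if_neg (by rw [hfd]; norm_num)]
        rw [show (1:Int) - 1 = 0 by norm_num, ih 0 (by omega) (by omega)]
        have z1 : PySem.Int.floordiv 0 2 = 0 := by decide
        have z2 : PySem.Int.mod 0 2 = 0 := by decide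
        have z3 : PySem.Int.floordiv 1 2 = 0 := by decide
        have z4 : PySem.Int.mod 1 2 = 1 := by decide
        rw [z1, z2, z3, z4]
        simp
    · have hv : v = 0 := by omega
      subst hv
      rw [if_neg hpos]
      have z1 : PySem.Int.floordiv 0 2 = 0 := by decide
      have z2 : PySem.Int.mod 0 2 = 0 := by decide
      rw [z1, z2]
      simp

theorem pvFoldInsert_getD (g : Char → Int) :
    ∀ (l : List Char) (d : PySem.Dict Char Int) (x : Char),
      (l.foldl (fun d c => d.insert c (g c)) d).getD x 0 = if x ∈ l then g x else d.getD x 0 := by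
  intro l
  induction l with
  | nil => intro d x; simp
  | cons h t ih =>
    intro d x
    simp only [List.foldl_cons]
    rw [ih, PySem.Dict.getD_insert]
    by_cases hx : x ∈ t
    · simp [hx]
    · by_cases hxh : x = h
      · simp [hx, hxh]
      · simp [hx, hxh]

theorem pvItemsA (l : List Char) : (dictA l).items = itemsOf l := by
  have hnd : (dictA l).keys.Nodup := by
    unfold dictA
    exact PySem.Dict.nodup_keys_foldl_insert l (fun _ c => ((PySem.Chars.count l [c] : Int))) _
      PySem.Dict.nodup_keys_empty
  have hk : (dictA l).keys = PySem.Set.ofList l := by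
    unfold dictA
    rw [PySem.Dict.keys_foldl_insert l (fun _ c => ((PySem.Chars.count l [c] : Int))) _,
      PySem.Dict.keys_empty]
    rfl
  rw [PySem.Dict.items_eq_map_keys _ hnd 0, hk]
  apply List.map_congr_left
  intro k hk2
  have hmem : k ∈ l := (PySem.Set.mem_ofList l k).mp hk2
  have hgd := pvFoldInsert_getD (fun c => ((PySem.Chars.count l [c] : Int))) l PySem.Dict.empty k
  unfold dictA
  rw [hgd, if_pos hmem, pvCount_singleton]

theorem pvItemsB (l : List Char) : (countB l).items = itemsOf l := by
  unfold countB
  rw [PySem.Dict.foldl_insert_getD_add_one_eq_counter]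
  exact PySem.Dict.items_counter l

theorem pvItemsOK (l : List Char) (hInv : InvL l) : ∀ kv ∈ itemsOf l, ItemOK kv := by
  intro kv hkv
  obtain ⟨k, hkS, rfl⟩ := List.mem_map.mp hkv
  have hkl : k ∈ l := (PySem.Set.mem_ofList l k).mp hkS
  have h1 : 0 < l.count k := List.count_pos_iff.mpr hkl
  refine ⟨?_, ?_⟩
  · show (1:Int) ≤ ((l.count k : Int))
    exact_mod_cast h1
  intro hne
  by_contra hlow
  have hle := hInv k hlow
  have : l.count k = 1 := by omega
  exact hne (by rw [this]; rfl)

-- A's item fold: result is the flatMap of per-item chunks; the final counter is nonzero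
-- exactly when it started nonzero or some item had value ≠ 1
theorem pvFoldA : ∀ (items : List (Char × Int)), (∀ kv ∈ items, ItemOK kv) →
    ∀ (res : List Char) (cA : Int),
    (items.foldl (fun acc kv =>
        if kv.2 == 1 then (acc.1 ++ [kv.1], acc.2)
        else (innerA kv.1 kv.2 acc.1, kv.2)) (res, cA)).1 = res ++ items.flatMap chunkIf ∧
    ((items.foldl (fun acc kv =>
        if kv.2 == 1 then (acc.1 ++ [kv.1], acc.2)
        else (innerA kv.1 kv.2 acc.1, kv.2)) (res, cA)).2 ≠ 0 ↔
      (cA ≠ 0 ∨ ∃ kv ∈ items, kv.2 ≠ 1)) := by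
  intro items
  induction items with
  | nil => intro _ res cA; simp
  | cons kv tl ih =>
    intro hP res cA
    have hkv : ItemOK kv := hP kv (by simp)
    have hPt : ∀ kv' ∈ tl, ItemOK kv' := fun kv' h => hP kv' (by simp [h])
    simp only [List.foldl_cons, List.flatMap_cons]
    by_cases h1 : kv.2 = 1
    · rw [if_pos (by simpa using h1)]
      obtain ⟨hfst, hsnd⟩ := ih hPt (res ++ [kv.1]) cA
      constructor
      · rw [hfst]; simp [chunkIf, h1]
      · rw [hsnd]
        constructor
        · rintro (h | h)
          · exact Or.inl h
          · exact Or.inr (by obtain ⟨x, hx, hx2⟩ := h; exact ⟨x, by simp [hx], hx2⟩)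
        · rintro (h | h)
          · exact Or.inl h
          · obtain ⟨x, hx, hx2⟩ := h
            rcases (List.mem_cons.mp hx) with rfl | hx'
            · exact absurd h1 hx2
            · exact Or.inr ⟨x, hx', hx2⟩
    · rw [if_neg (by simpa using h1)]
      have hlow : kv.1 ∈ lowLetters := hkv.2 h1
      have hge2 : 2 ≤ kv.2 := by have := hkv.1; omega
      have hrw : innerA kv.1 kv.2 res = res ++ chunkB kv.1 kv.2 := by
        rw [pvInnerA_aux kv.1 kv.2.toNat kv.2 le_rfl (by omega),
          pvNextA_eq_nextB kv.1 hlow]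
        rfl
      rw [hrw]
      obtain ⟨hfst, hsnd⟩ := ih hPt (res ++ chunkB kv.1 kv.2) kv.2
      constructor
      · rw [hfst]; simp [chunkIf, h1]
      · rw [hsnd]
        constructor
        · intro _; exact Or.inr ⟨kv, by simp, h1⟩
        · intro _; exact Or.inl (by omega)

-- the per-pass transition on strings, as data
theorem pvStepA_fst (l : List Char) (hInv : InvL l) :
    (stepA l).1 = (itemsOf l).flatMap chunkIf := by
  unfold stepA
  rw [pvItemsA]
  exact (pvFoldA _ (pvItemsOK l hInv) [] 0).1

theorem pvStepA_snd (l : List Char) (hInv : InvL l) :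
    ((stepA l).2 ≠ 0 ↔ ∃ kv ∈ itemsOf l, kv.2 ≠ 1) := by
  unfold stepA
  rw [pvItemsA]
  have h := (pvFoldA _ (pvItemsOK l hInv) [] 0).2
  simpa using h

-- counting fold (B's dict-building loop) over pieces of the conceptual string
def countFold (xs : List Char) (d : PySem.Dict Char Int) : PySem.Dict Char Int :=
  xs.foldl (fun d c => d.insert c (d.getD c 0 + 1)) d

theorem pvCountFold_append (xs ys : List Char) (d : PySem.Dict Char Int) :
    countFold (xs ++ ys) d = countFold ys (countFold xs d) := by
  simp [countFold, List.foldl_append]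

theorem pvCountFold_replicate : ∀ (k : Nat) (c : Char) (d : PySem.Dict Char Int), k ≠ 0 →
    countFold (List.replicate k c) d = d.insert c (d.getD c 0 + (k : Int)) := by
  intro k
  induction k with
  | zero => intro c d h; exact absurd rfl h
  | succ n ih =>
    intro c d _
    rw [List.replicate_succ]
    show countFold (List.replicate n c) (d.insert c (d.getD c 0 + 1)) = _
    by_cases hn : n = 0
    · subst hn; simp [countFold]
    · rw [ih c _ hn, PySem.Dict.getD_insert_self, PySem.Dict.insert_insert_self]
      congr 1
      push_cast
      ring

-- the counting fold over one item's chunk is exactly B's per-item dict update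
theorem pvCountFold_chunk (kv : Char × Int) (hkv : ItemOK kv) (nd : PySem.Dict Char Int) :
    countFold (chunkIf kv) nd = stepBf nd kv := by
  unfold chunkIf stepBf
  by_cases h1 : kv.2 = 1
  · rw [if_pos h1, if_pos (by simpa using h1)]
    simp [countFold]
  · rw [if_neg h1, if_neg (by simpa using h1)]
    have hge2 : 2 ≤ kv.2 := by have := hkv.1; omega
    have hfd : PySem.Int.floordiv kv.2 2 = kv.2 / 2 := PySem.Int.floordiv_eq_ediv_of_pos (by omega)
    have hmd : PySem.Int.mod kv.2 2 = kv.2 % 2 := PySem.Int.mod_eq_emod_of_pos (by omega)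
    unfold chunkB
    rw [pvCountFold_append]
    have hinner : countFold (List.replicate (PySem.Int.floordiv kv.2 2).toNat (nextB kv.1)) nd
        = stepBf1 nd kv := by
      rw [pvCountFold_replicate _ _ _ (by rw [hfd]; omega)]
      unfold stepBf1
      congr 2
      rw [hfd]; omega
    rw [hinner]
    by_cases hr : PySem.Int.mod kv.2 2 = 0
    · rw [if_neg (by simpa using hr), hr]
      simp [countFold]
    · have hr1 : PySem.Int.mod kv.2 2 = 1 := by rw [hmd] at hr ⊢; omega
      rw [if_pos hr, hr1]
      simp [countFold]

theorem pvCountFold_flatMap : ∀ (items : List (Char × Int)), (∀ kv ∈ items, ItemOK kv) →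
    ∀ (nd : PySem.Dict Char Int),
    countFold (items.flatMap chunkIf) nd = items.foldl stepBf nd := by
  intro items
  induction items with
  | nil => intro _ nd; simp [countFold]
  | cons kv tl ih =>
    intro hP nd
    simp only [List.flatMap_cons, List.foldl_cons]
    rw [pvCountFold_append, pvCountFold_chunk kv (hP kv (by simp)),
      ih (fun kv' h => hP kv' (by simp [h]))]

-- the dict of the next string equals B's dict-level step
theorem pvCountStep (l : List Char) (hInv : InvL l) :
    countB (stepA l).1 = stepB (countB l) := by
  rw [pvStepA_fst l hInv]
  show countFold ((itemsOf l).flatMap chunkIf) PySem.Dict.empty = _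
  rw [pvCountFold_flatMap _ (pvItemsOK l hInv), stepB, pvItemsB]

-- B's loop guard agrees with A's counter
theorem pvGuard (l : List Char) (hInv : InvL l) :
    (allOneB (countB l) = false ↔ (stepA l).2 ≠ 0) := by
  rw [pvStepA_snd l hInv]
  unfold allOneB
  have hv : (countB l).values = (itemsOf l).map (·.2) := by
    show (countB l).items.map (·.2) = _
    rw [pvItemsB]
  rw [hv, List.all_eq_false]
  constructor
  · rintro ⟨v, hv2, hne⟩
    obtain ⟨kv, hkv, rfl⟩ := List.mem_map.mp hv2
    exact ⟨kv, hkv, by simpa using hne⟩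
  · rintro ⟨kv, hkv, hne⟩
    exact ⟨kv.2, List.mem_map_of_mem hkv, by simpa using hne⟩

-- on an all-unique string A's pass returns the string itself
theorem pvAllOne_fix (l : List Char) (hInv : InvL l) (hall : ∀ kv ∈ itemsOf l, kv.2 = 1) :
    (stepA l).1 = l := by
  rw [pvStepA_fst l hInv]
  have hnd : l.Nodup := by
    rw [List.nodup_iff_count_eq_one]
    intro a ha
    have := hall (a, (l.count a : Int))
      (List.mem_map.mpr ⟨a, (PySem.Set.mem_ofList l a).mpr ha, rfl⟩)
    have h2 : ((l.count a : Int)) = 1 := this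
    exact_mod_cast h2
  have : (itemsOf l).flatMap chunkIf = PySem.Set.ofList l := by
    unfold itemsOf
    rw [List.flatMap_map]
    have : ∀ x ∈ PySem.Set.ofList l, (chunkIf ∘ fun k => (k, (l.count k : Int))) x = [x] := by
      intro x hx
      have h1 : ((l.count x : Int)) = 1 :=
        hall (x, (l.count x : Int)) (List.mem_map.mpr ⟨x, hx, rfl⟩)
      simp [chunkIf, h1]
    calc (PySem.Set.ofList l).flatMap (chunkIf ∘ fun k => (k, (l.count k : Int)))
        = (PySem.Set.ofList l).flatMap (fun x => [x]) := List.flatMap_congr this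
      _ = PySem.Set.ofList l := by simp
  rw [this, PySem.Set.ofList_eq_self_of_nodup l hnd]

theorem pvKeysCountB (l : List Char) : (countB l).keys = PySem.Set.ofList l := by
  unfold countB
  rw [PySem.Dict.foldl_insert_getD_add_one_eq_counter]
  exact PySem.Dict.keys_counter l

-- a changing pass strictly shrinks the string
theorem pvSumLt {α : Type} (f g : α → Nat) : ∀ (xs : List α),
    (∀ x ∈ xs, f x ≤ g x) → (∃ x ∈ xs, f x < g x) →
    (xs.map f).sum < (xs.map g).sum := by
  intro xs
  induction xs with
  | nil => intro _ h; simp at h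
  | cons x tl ih =>
    intro hle ⟨w, hw, hwlt⟩
    simp only [List.map_cons, List.sum_cons]
    rcases List.mem_cons.mp hw with rfl | hw'
    · have : (tl.map f).sum ≤ (tl.map g).sum := by
        apply List.sum_le_sum
        intro y hy
        exact hle y (by simp [hy])
      omega
    · have h1 : f x ≤ g x := hle x (by simp)
      have h2 := ih (fun y hy => hle y (by simp [hy])) ⟨w, hw', hwlt⟩
      omega

theorem pvSumcounts (l : List Char) :
    ((itemsOf l).map (fun kv => kv.2.toNat)).sum = l.length := by
  unfold itemsOf
  rw [List.map_map]
  have he : ((fun kv : Char × Int => kv.2.toNat) ∘ fun k => (k, (l.count k : Int))) =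
      fun k => l.count k := by
    funext k; simp
  rw [he]
  have hperm : (PySem.Set.ofList l).Perm l.dedup := by
    rw [List.perm_ext_iff_of_nodup (PySem.Set.nodup_ofList l) l.nodup_dedup]
    intro a
    rw [PySem.Set.mem_ofList, List.mem_dedup]
  have := (hperm.map (fun k => l.count k)).sum_eq
  rw [this]
  exact List.sum_map_count_dedup_eq_length l

theorem pvChunkLen (kv : Char × Int) (hkv : ItemOK kv) :
    (chunkIf kv).length ≤ kv.2.toNat ∧ (kv.2 ≠ 1 → (chunkIf kv).length < kv.2.toNat) := by
  unfold chunkIf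
  by_cases h1 : kv.2 = 1
  · rw [if_pos h1]; constructor
    · simp [h1]
    · intro h; exact absurd h1 h
  · rw [if_neg h1]
    have hge2 : 2 ≤ kv.2 := by have := hkv.1; omega
    have hfd : PySem.Int.floordiv kv.2 2 = kv.2 / 2 := PySem.Int.floordiv_eq_ediv_of_pos (by omega)
    have hmd : PySem.Int.mod kv.2 2 = kv.2 % 2 := PySem.Int.mod_eq_emod_of_pos (by omega)
    unfold chunkB
    rw [List.length_append, List.length_replicate, List.length_replicate, hfd, hmd]
    constructor
    · omega
    · intro _; omega

theorem pvStepA_len (l : List Char) (hInv : InvL l)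
    (hch : ∃ kv ∈ itemsOf l, kv.2 ≠ 1) : (stepA l).1.length < l.length := by
  rw [pvStepA_fst l hInv, List.length_flatMap, ← pvSumcounts l]
  apply pvSumLt
  · intro kv hkv
    exact (pvChunkLen kv (pvItemsOK l hInv kv hkv)).1
  · obtain ⟨kv, hkv, hne⟩ := hch
    exact ⟨kv, hkv, (pvChunkLen kv (pvItemsOK l hInv kv hkv)).2 hne⟩

-- Invariant preservation (counts of non-lowercase chars stay ≤ 1 in the next string)
theorem pvChunk_count (kv : Char × Int) (hkv : ItemOK kv) (c : Char) (hc : c ∉ lowLetters) :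
    (chunkIf kv).count c = if kv.1 = c ∧ kv.2 = 1 then 1 else 0 := by
  unfold chunkIf
  by_cases h1 : kv.2 = 1
  · rw [if_pos h1]
    by_cases hkc : kv.1 = c
    · subst hkc; simp [h1]
    · rw [if_neg (fun hh => hkc hh.1)]
      simp [List.count_cons, hkc]
  · have hlow := hkv.2 h1
    have hn : nextB kv.1 ≠ c := fun he => hc (he ▸ pvNextB_mem kv.1 hlow)
    have hk : kv.1 ≠ c := fun he => hc (he ▸ hlow)
    rw [if_neg h1, if_neg (fun hh => hk hh.1)]
    simp [chunkB, List.count_append, List.count_replicate, hn, hk]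

theorem pvFlatMap_zero (c : Char) : ∀ (items : List (Char × Int)),
    (∀ kv ∈ items, ItemOK kv ∧ kv.1 ≠ c) → c ∉ lowLetters →
    (items.flatMap chunkIf).count c = 0 := by
  intro items
  induction items with
  | nil => simp
  | cons kv tl ih =>
    intro hP hc
    have h := pvChunk_count kv (hP kv (by simp)).1 c hc
    simp only [List.flatMap_cons, List.count_append]
    rw [h, if_neg (by intro hh; exact (hP kv (by simp)).2 hh.1)]
    rw [ih (fun kv' h' => hP kv' (by simp [h'])) hc]

theorem pvFlatMap_le_one (c : Char) (hc : c ∉ lowLetters) : ∀ (items : List (Char × Int)),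
    (∀ kv ∈ items, ItemOK kv) → (items.map Prod.fst).Nodup →
    (items.flatMap chunkIf).count c ≤ 1 := by
  intro items
  induction items with
  | nil => simp
  | cons kv tl ih =>
    intro hP hnd
    have hkv : ItemOK kv := hP kv (by simp)
    have hPt : ∀ kv' ∈ tl, ItemOK kv' := fun kv' h => hP kv' (by simp [h])
    simp only [List.map_cons, List.nodup_cons] at hnd
    simp only [List.flatMap_cons, List.count_append]
    rw [pvChunk_count kv hkv c hc]
    by_cases hkc : kv.1 = c ∧ kv.2 = 1
    · rw [if_pos hkc]
      have hz : (tl.flatMap chunkIf).count c = 0 := by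
        apply pvFlatMap_zero c tl _ hc
        intro kv' h'
        refine ⟨hPt kv' h', ?_⟩
        intro he
        have heq : kv.1 = kv'.1 := by rw [hkc.1, he]
        rw [heq] at hnd
        exact hnd.1 (List.mem_map_of_mem (f := Prod.fst) h')
      omega
    · rw [if_neg hkc]
      have := ih hPt hnd.2
      omega

theorem pvInvStep (l : List Char) (hInv : InvL l) : InvL (stepA l).1 := by
  intro c hc
  rw [pvStepA_fst l hInv]
  apply pvFlatMap_le_one c hc _ (pvItemsOK l hInv)
  unfold itemsOf
  rw [List.map_map]
  have : (Prod.fst ∘ fun k => (k, ((l.count k : Int)))) = id := rfl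
  rw [this, List.map_id]
  exact PySem.Set.nodup_ofList l

-- the main loop correspondence
theorem pvLoopEq : ∀ (n : Nat) (l : List Char), InvL l → l.length < n →
    loopA n l = (loopB n (countB l)).keys := by
  intro n
  induction n with
  | zero => intro l _ h; omega
  | succ n ih =>
    intro l hInv hlen
    simp only [loopA, loopB]
    by_cases hall : allOneB (countB l) = true
    · have hnoch : ¬ ∃ kv ∈ itemsOf l, kv.2 ≠ 1 := by
        intro hch
        have := (pvGuard l hInv).mpr ((pvStepA_snd l hInv).mpr hch)
        rw [hall] at this; cases this
      have hc0 : ¬ (stepA l).2 ≠ 0 := fun h => hnoch ((pvStepA_snd l hInv).mp h)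
      rw [if_neg hc0, if_pos hall]
      have hall1 : ∀ kv ∈ itemsOf l, kv.2 = 1 := by
        intro kv hkv
        by_contra hne
        exact hnoch ⟨kv, hkv, hne⟩
      rw [pvAllOne_fix l hInv hall1, pvKeysCountB]
      have hnd : l.Nodup := by
        rw [List.nodup_iff_count_eq_one]
        intro a ha
        have := hall1 (a, (l.count a : Int))
          (List.mem_map.mpr ⟨a, (PySem.Set.mem_ofList l a).mpr ha, rfl⟩)
        have h2 : ((l.count a : Int)) = 1 := this
        exact_mod_cast h2
      rw [PySem.Set.ofList_eq_self_of_nodup l hnd]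
    · have hch : ∃ kv ∈ itemsOf l, kv.2 ≠ 1 :=
        (pvStepA_snd l hInv).mp ((pvGuard l hInv).mp (Bool.eq_false_iff.mpr hall))
      rw [if_pos ((pvGuard l hInv).mp (Bool.eq_false_iff.mpr hall)), if_neg hall,
        ← pvCountStep l hInv]
      exact ih (stepA l).1 (pvInvStep l hInv)
        (by have := pvStepA_len l hInv hch; omega)

-- ===== VERDICT (by name: the statement is the Claim_ definition above) =====
theorem replace_duplicates_spec : Claim_equal_replace_duplicates := by
  intro s _ hpre
  unfold Spec_replace_duplicates replace_duplicates replace_duplicates_alt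
  have hInv : InvL s.toList := by
    intro c hc
    by_cases hm : c ∈ s.toList
    · have hce := List.all_eq_true.mp hpre c hm
      simp only [Bool.or_eq_true, decide_eq_true_eq] at hce
      rcases hce with h | h
      · exact absurd (by simpa using h) hc
      · exact h
    · simp [List.count_eq_zero_of_not_mem hm]
  rw [pvLoopEq _ _ hInv (by omega)]
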